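-- pv_equiv track=rewrite | github.com/lmnunes2002/UltraShop | flaskblog/blueprints/comments/utils.py | get_pagination_list
-- ===== SOURCE A (Python) =====
-- from typing import List, Optional
--
-- def get_pagination_list(
--     current_page: int,
--     total_pages: int,
--     left_edge: int = 1,
--     right_edge: int = 1,
--     left_current: int = 1,
--     right_current: int = 2
-- ) -> List[Optional[int]]:
--
--     items = []
--     last_num = 0
--
--     for num in range(1, total_pages + 1):
--         if (
--             num <= left_edge
--             or num > total_pages - right_edge
--             or (current_page - left_current <= num <= current_page + right_current)
--         ):
--             if last_num + 1 != num:
--                 items.append(None)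
--
--             items.append(num)
--             last_num = num
--
--     return items
-- ===== SOURCE B (Python) =====
-- def get_pagination_list(
--     current_page: int,
--     total_pages: int,
--     left_edge: int = 1,
--     right_edge: int = 1,
--     left_current: int = 1,
--     right_current: int = 2,
-- ):
--     # Union of the three page intervals, clamped to [1, total_pages],
--     # merged, then emitted with None at the gaps: O(k) in the output size.
--     raw = [
--         (1, left_edge),
--         (current_page - left_current, current_page + right_current),
--         (total_pages - right_edge + 1, total_pages),
--     ]
--     ivs = []
--     for a, b in raw:
--         lo = max(a, 1)
--         hi = min(b, total_pages)
--         if lo <= hi: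
--             ivs.append((lo, hi))
--     ivs.sort(key=lambda iv: iv[0])
--     merged = []
--     for a, b in ivs:
--         if merged and a <= merged[-1][1] + 1:
--             if b > merged[-1][1]:
--                 merged[-1] = (merged[-1][0], b)
--         else:
--             merged.append((a, b))
--     items = []
--     last = 0
--     for a, b in merged:
--         if a != last + 1:
--             items.append(None)
--         items.extend(range(a, b + 1))
--         last = b
--     return items
-- ===== Notes on version B (the rewrite author's own statement) =====
-- stated objective: faster
-- what changed: Instead of scanning every page number 1..total_pages and testing the keep-condition, B clamps the three page intervals to [1,total_pages], sorts and merges them, and emits each merged run directly with None at gaps, so the work is proportional to the output size rather than total_pages.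
import Mathlib
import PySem

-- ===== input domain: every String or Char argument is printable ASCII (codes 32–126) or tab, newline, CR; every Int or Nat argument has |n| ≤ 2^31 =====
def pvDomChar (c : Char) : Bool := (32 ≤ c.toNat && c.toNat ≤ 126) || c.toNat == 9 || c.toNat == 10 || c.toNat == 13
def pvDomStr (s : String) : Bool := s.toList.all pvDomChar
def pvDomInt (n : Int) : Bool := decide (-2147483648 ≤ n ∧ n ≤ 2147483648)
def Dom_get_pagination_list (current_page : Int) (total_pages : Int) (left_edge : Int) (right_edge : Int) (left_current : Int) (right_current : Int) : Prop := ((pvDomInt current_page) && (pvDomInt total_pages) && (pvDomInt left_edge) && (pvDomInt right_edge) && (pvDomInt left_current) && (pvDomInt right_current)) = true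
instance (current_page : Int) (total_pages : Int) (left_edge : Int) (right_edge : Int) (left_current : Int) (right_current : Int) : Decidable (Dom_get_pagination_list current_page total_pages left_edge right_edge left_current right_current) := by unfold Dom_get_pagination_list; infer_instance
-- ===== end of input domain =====

-- B replaces A's scan of every page number 1..total_pages by clamping/merging the three
-- page intervals and emitting the merged runs directly (work proportional to the output).

-- ===== PORT A =====
def get_pagination_list (current_page : Int) (total_pages : Int) (left_edge : Int) (right_edge : Int) (left_current : Int) (right_current : Int) : List (Option Int) :=
  ((PySem.List.pyRange 1 (total_pages + 1) 1).foldl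
    (fun (st : List (Option Int) × Int) num =>
      if num ≤ left_edge ∨ total_pages - right_edge < num ∨
          (current_page - left_current ≤ num ∧ num ≤ current_page + right_current) then
        ((if st.2 + 1 ≠ num then st.1 ++ [Option.none] else st.1) ++ [some num], num)
      else st)
    ([], 0)).1

-- ===== PORT B =====
-- B-side helpers: the three loop bodies of Source B
def pvClampStep (total_pages : Int) (acc : List (Int × Int)) (p : Int × Int) : List (Int × Int) :=
  let lo := max p.1 1
  let hi := min p.2 total_pages
  if lo ≤ hi then acc ++ [(lo, hi)] else acc

def pvMergeStep (m : List (Int × Int)) (p : Int × Int) : List (Int × Int) :=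
  match m.getLast? with
  | some q =>
      if p.1 ≤ q.2 + 1 then
        (if q.2 < p.2 then m.dropLast ++ [(q.1, p.2)] else m)
      else m ++ [p]
  | none => m ++ [p]

def pvEmitStep (st : List (Option Int) × Int) (p : Int × Int) : List (Option Int) × Int :=
  ((if p.1 ≠ st.2 + 1 then st.1 ++ [Option.none] else st.1)
    ++ (PySem.List.pyRange p.1 (p.2 + 1) 1).map some, p.2)

def get_pagination_list_alt (current_page : Int) (total_pages : Int) (left_edge : Int) (right_edge : Int) (left_current : Int) (right_current : Int) : List (Option Int) :=
  let raw : List (Int × Int) :=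
    [(1, left_edge),
     (current_page - left_current, current_page + right_current),
     (total_pages - right_edge + 1, total_pages)]
  let ivs := raw.foldl (pvClampStep total_pages) []
  let sortedIvs := PySem.List.sorted ivs (fun iv => iv.1) false
  let merged := sortedIvs.foldl pvMergeStep []
  (merged.foldl pvEmitStep ([], 0)).1

-- ===== PRECONDITION & SPEC =====
def Spec_get_pagination_list (current_page : Int) (total_pages : Int) (left_edge : Int) (right_edge : Int) (left_current : Int) (right_current : Int) (out : List (Option Int)) : Prop := out = get_pagination_list_alt current_page total_pages left_edge right_edge left_current right_current
instance (current_page : Int) (total_pages : Int) (left_edge : Int) (right_edge : Int) (left_current : Int) (right_current : Int) (out : List (Option Int)) : Decidable (Spec_get_pagination_list current_page total_pages left_edge right_edge left_current right_current out) := by unfold Spec_get_pagination_list; infer_instance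

-- ===== CLAIM (what is proved, stated in full; the proofs are below) =====
def Claim_equal_get_pagination_list : Prop := ∀ (current_page : Int) (total_pages : Int) (left_edge : Int) (right_edge : Int) (left_current : Int) (right_current : Int), Dom_get_pagination_list current_page total_pages left_edge right_edge left_current right_current → Spec_get_pagination_list current_page total_pages left_edge right_edge left_current right_current (get_pagination_list current_page total_pages left_edge right_edge left_current right_current)

-- ===== LEMMAS AND PROOFS =====

-- Common abstraction: render a strictly increasing list of page numbers, inserting
-- `none` whenever a number does not directly follow the previous one.
def pvRender : Int → List Int → List (Option Int)
  | _, [] => []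
  | last, x :: r => (if last + 1 ≠ x then [Option.none] else []) ++ some x :: pvRender x r

def pvEmit : Int → List (Int × Int) → List (Option Int)
  | _, [] => []
  | last, p :: r =>
      (if p.1 ≠ last + 1 then [Option.none] else [])
        ++ (PySem.List.pyRange p.1 (p.2 + 1) 1).map some ++ pvEmit p.2 r

-- A's loop produces pvRender of the kept numbers
lemma pv_foldA (P : Int → Prop) [DecidablePred P] :
    ∀ (xs : List Int) (acc : List (Option Int)) (last : Int),
      (xs.foldl
        (fun (st : List (Option Int) × Int) num =>
          if P num then
            ((if st.2 + 1 ≠ num then st.1 ++ [Option.none] else st.1) ++ [some num], num)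
          else st)
        (acc, last)).1
      = acc ++ pvRender last (xs.filter fun n => decide (P n)) := by
  intro xs
  induction xs with
  | nil => intro acc last; simp [pvRender]
  | cons x r ih =>
      intro acc last
      by_cases h : P x
      · by_cases hg : last + 1 ≠ x
        · rw [List.foldl_cons, if_pos h, if_pos hg, ih]
          simp [h, hg, pvRender]
        · rw [List.foldl_cons, if_pos h, if_neg hg, ih]
          simp [h, hg, pvRender]
      · rw [List.foldl_cons, if_neg h, ih]
        simp [h]

-- B's emit loop produces pvEmit
lemma pv_foldB :
    ∀ (ms : List (Int × Int)) (acc : List (Option Int)) (last : Int),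
      (ms.foldl pvEmitStep (acc, last)).1 = acc ++ pvEmit last ms := by
  intro ms
  induction ms with
  | nil => intro acc last; simp [pvEmit]
  | cons p r ih =>
      intro acc last
      simp only [List.foldl_cons, pvEmitStep, ih, pvEmit]
      by_cases hg : p.1 ≠ last + 1 <;> simp [hg]

-- rendering one contiguous run
lemma pv_render_run (n : Nat) :
    ∀ (a last : Int) (rest : List Int),
      pvRender last (PySem.List.pyRange a (a + (n + 1)) 1 ++ rest)
      = (if last + 1 ≠ a then [Option.none] else [])
          ++ (PySem.List.pyRange a (a + (n + 1)) 1).map some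
          ++ pvRender (a + n) rest := by
  induction n with
  | zero =>
      intro a last rest
      have e : a + ((0 : Nat) + 1 : Int) = a + 1 := by norm_num
      rw [e, PySem.List.pyRange_one_singleton]
      simp [pvRender]
  | succ k ih =>
      intro a last rest
      have hlt : a < a + ((k + 1 : Nat) + 1 : Int) := by push_cast; omega
      rw [PySem.List.pyRange_one_cons hlt]
      have e : a + ((k + 1 : Nat) + 1 : Int) = (a + 1) + ((k : Nat) + 1 : Int) := by
        push_cast; ring
      rw [e]
      have := ih (a + 1) a rest
      simp only [pvRender, List.cons_append, this]
      have e2 : a + 1 + (k : Int) = a + ((k + 1 : Nat) : Int) := by push_cast; ring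
      simp [e2]

lemma pv_emit_eq_render :
    ∀ (ms : List (Int × Int)) (last : Int), (∀ p ∈ ms, p.1 ≤ p.2) →
      pvEmit last ms
        = pvRender last (ms.flatMap fun p => PySem.List.pyRange p.1 (p.2 + 1) 1) := by
  intro ms
  induction ms with
  | nil => intro last h; simp [pvEmit, pvRender]
  | cons p r ih =>
      intro last h
      have hp : p.1 ≤ p.2 := h p (List.mem_cons_self ..)
      have hn : p.2 + 1 = p.1 + (((p.2 - p.1).toNat : Int) + 1) := by omega
      simp only [List.flatMap_cons, pvEmit]
      rw [hn, pv_render_run]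
      rw [ih p.2 (fun q hq => h q (List.mem_cons_of_mem _ hq))]
      have e : p.1 + ((p.2 - p.1).toNat : Int) = p.2 := by omega
      rw [e]
      by_cases hg : p.1 = last + 1
      · simp [hg]
      · simp [hg, Ne.symm hg]

lemma pvClampStep_eq (tp : Int) (acc : List (Int × Int)) (p : Int × Int) :
    pvClampStep tp acc p
      = if max p.1 1 ≤ min p.2 tp then acc ++ [(max p.1 1, min p.2 tp)] else acc := rfl

-- interval chains
def pvChain (m : List (Int × Int)) : Prop :=
  List.IsChain (fun p q => p.2 + 2 ≤ q.1) m ∧ ∀ p ∈ m, p.1 ≤ p.2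

lemma pv_merge_fold (xs : List (Int × Int)) :
    ∀ (m : List (Int × Int)),
      (∀ p ∈ xs, p.1 ≤ p.2) →
      List.Pairwise (fun p q : Int × Int => p.1 ≤ q.1) xs →
      pvChain m →
      (∀ p ∈ m, ∀ q ∈ xs, p.1 ≤ q.1) →
      pvChain (xs.foldl pvMergeStep m) ∧
      (∀ x : Int,
        (∃ p ∈ xs.foldl pvMergeStep m, p.1 ≤ x ∧ x ≤ p.2)
          ↔ (∃ p ∈ m, p.1 ≤ x ∧ x ≤ p.2) ∨ (∃ p ∈ xs, p.1 ≤ x ∧ x ≤ p.2)) := by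
  induction xs with
  | nil =>
      intro m _ _ hchain _
      refine ⟨hchain, fun x => ?_⟩
      simp
  | cons p r ih =>
      intro m hne hpw hchain hle
      simp only [List.foldl_cons]
      rw [List.pairwise_cons] at hpw
      have hp : p.1 ≤ p.2 := hne p (List.mem_cons_self ..)
      -- establish the three facts about one merge step
      have key : pvChain (pvMergeStep m p) ∧
          (∀ x : Int, (∃ q ∈ pvMergeStep m p, q.1 ≤ x ∧ x ≤ q.2)
            ↔ (∃ q ∈ m, q.1 ≤ x ∧ x ≤ q.2) ∨ (p.1 ≤ x ∧ x ≤ p.2)) ∧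
          (∀ q ∈ pvMergeStep m p, ∀ z ∈ r, q.1 ≤ z.1) := by
        unfold pvMergeStep
        cases hlast : m.getLast? with
        | none =>
            have hm : m = [] := List.getLast?_eq_none_iff.mp hlast
            subst hm
            refine ⟨⟨by simp [List.isChain_cons], by simpa using hp⟩, fun x => by simp, ?_⟩
            intro q hq z hz
            simp at hq
            subst hq
            exact hpw.1 z hz
        | some q =>
            obtain ⟨init, rfl⟩ := List.getLast?_eq_some_iff.mp hlast
            have hq1 : q.1 ≤ p.1 := hle q (by simp) p (List.mem_cons_self ..)
            have hqne : q.1 ≤ q.2 := hchain.2 q (by simp)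
            obtain ⟨hch, hnem⟩ := hchain
            rw [List.isChain_append] at hch
            dsimp only
            by_cases h1 : p.1 ≤ q.2 + 1
            · by_cases h2 : q.2 < p.2
              · rw [if_pos h1, if_pos h2, List.dropLast_concat]
                refine ⟨⟨?_, ?_⟩, ?_, ?_⟩
                · rw [List.isChain_append]
                  refine ⟨hch.1, by simp [List.isChain_cons], ?_⟩
                  intro x hx y hy
                  simp only [List.head?_cons, Option.mem_def, Option.some.injEq] at hy
                  subst hy
                  exact hch.2.2 x hx q (by simp)
                · intro z hz
                  rcases List.mem_append.mp hz with hz | hz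
                  · exact hnem z (List.mem_append.mpr (Or.inl hz))
                  · simp only [List.mem_singleton] at hz
                    subst hz
                    simp only
                    omega
                · intro x
                  simp only [List.mem_append, List.mem_singleton]
                  constructor
                  · rintro ⟨z, hz | rfl, hxz⟩
                    · exact Or.inl ⟨z, Or.inl hz, hxz⟩
                    · simp only at hxz
                      by_cases hx2 : x ≤ q.2
                      · exact Or.inl ⟨q, Or.inr rfl, by omega⟩
                      · exact Or.inr (by omega)
                  · rintro (⟨z, hz | rfl, hxz⟩ | hxp)
                    · exact ⟨z, Or.inl hz, hxz⟩
                    · exact ⟨(z.1, p.2), Or.inr rfl, by simp only; omega⟩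
                    · exact ⟨(q.1, p.2), Or.inr rfl, by simp only; omega⟩
                · intro z hz w hw
                  rcases List.mem_append.mp hz with hz | hz
                  · exact hle z (List.mem_append.mpr (Or.inl hz)) w (List.mem_cons_of_mem _ hw)
                  · simp only [List.mem_singleton] at hz
                    subst hz
                    exact hle q (by simp) w (List.mem_cons_of_mem _ hw)
              · rw [if_pos h1, if_neg h2]
                refine ⟨⟨by rw [List.isChain_append]; exact hch, hnem⟩, ?_, ?_⟩
                · intro x
                  constructor
                  · exact Or.inl
                  · rintro (hh | hxp)
                    · exact hh
                    · exact ⟨q, by simp, by omega⟩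
                · intro z hz w hw
                  exact hle z hz w (List.mem_cons_of_mem _ hw)
            · rw [if_neg h1]
              refine ⟨⟨?_, ?_⟩, ?_, ?_⟩
              · rw [List.isChain_append]
                refine ⟨by rw [List.isChain_append]; exact hch, by simp [List.isChain_cons], ?_⟩
                intro x hx y hy
                simp only [List.head?_cons, Option.mem_def, Option.some.injEq] at hy
                subst hy
                rw [List.getLast?_concat, Option.mem_def, Option.some.injEq] at hx
                subst hx
                omega
              · intro z hz
                rcases List.mem_append.mp hz with hz | hz
                · exact hnem z hz
                · simp only [List.mem_singleton] at hz
                  subst hz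
                  exact hp
              · intro x
                simp only [List.mem_append, List.mem_singleton]
                constructor
                · rintro ⟨z, hz | rfl, hxz⟩
                  · exact Or.inl ⟨z, hz, hxz⟩
                  · exact Or.inr hxz
                · rintro (⟨z, hz, hxz⟩ | hxp)
                  · exact ⟨z, Or.inl hz, hxz⟩
                  · exact ⟨p, Or.inr rfl, hxp⟩
              · intro z hz w hw
                rcases List.mem_append.mp hz with hz | hz
                · exact hle z hz w (List.mem_cons_of_mem _ hw)
                · simp only [List.mem_singleton] at hz
                  subst hz
                  exact hpw.1 w hw
      obtain ⟨kch, kun, kle⟩ := key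
      have := ih (pvMergeStep m p) (fun z hz => hne z (List.mem_cons_of_mem _ hz)) hpw.2 kch kle
      refine ⟨this.1, fun x => ?_⟩
      rw [(this.2 x), kun x]
      simp only [List.mem_cons]
      constructor
      · rintro ((hh | hh) | hh)
        · exact Or.inl hh
        · exact Or.inr ⟨p, Or.inl rfl, hh⟩
        · obtain ⟨z, hz, hxz⟩ := hh
          exact Or.inr ⟨z, Or.inr hz, hxz⟩
      · rintro (hh | ⟨z, rfl | hz, hxz⟩)
        · exact Or.inl (Or.inl hh)
        · exact Or.inl (Or.inr hxz)
        · exact Or.inr ⟨z, hz, hxz⟩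

lemma pv_flat_sorted :
    ∀ (m : List (Int × Int)), pvChain m →
      List.Pairwise (· < ·) (m.flatMap fun p => PySem.List.pyRange p.1 (p.2 + 1) 1) ∧
      (∀ x ∈ m.flatMap fun p => PySem.List.pyRange p.1 (p.2 + 1) 1,
        ∀ q ∈ m.head?, q.1 ≤ x) := by
  intro m
  induction m with
  | nil => intro _; simp
  | cons p r ih =>
      rintro ⟨hch, hne⟩
      rw [List.isChain_cons] at hch
      obtain ⟨ihp, ihlb⟩ := ih ⟨hch.2, fun q hq => hne q (List.mem_cons_of_mem _ hq)⟩
      have hp : p.1 ≤ p.2 := hne p (List.mem_cons_self ..)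
      have hcross : ∀ y ∈ r.flatMap fun q => PySem.List.pyRange q.1 (q.2 + 1) 1, p.2 + 2 ≤ y := by
        intro y hy
        cases r with
        | nil => simp at hy
        | cons q0 r' =>
            have h1 : p.2 + 2 ≤ q0.1 := hch.1 q0 rfl
            have h2 : q0.1 ≤ y := ihlb y hy q0 rfl
            omega
      constructor
      · simp only [List.flatMap_cons]
        rw [List.pairwise_append]
        refine ⟨PySem.List.pairwise_lt_pyRange_one _ _, ihp, ?_⟩
        intro a ha b hb
        have ha' := (PySem.List.mem_pyRange_one.mp ha).2
        have hb' := hcross b hb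
        omega
      · intro x hx q hq
        simp only [List.head?_cons, Option.mem_def, Option.some.injEq] at hq
        subst hq
        simp only [List.flatMap_cons, List.mem_append] at hx
        rcases hx with hx | hx
        · exact (PySem.List.mem_pyRange_one.mp hx).1
        · have := hcross x hx
          omega

lemma pv_mem_flat (m : List (Int × Int)) (x : Int) :
    x ∈ (m.flatMap fun p => PySem.List.pyRange p.1 (p.2 + 1) 1)
      ↔ ∃ p ∈ m, p.1 ≤ x ∧ x ≤ p.2 := by
  simp only [List.mem_flatMap, PySem.List.mem_pyRange_one]
  constructor <;> rintro ⟨p, h1, h2, h3⟩ <;> exact ⟨p, h1, by omega, by omega⟩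

lemma pv_eq_of_pairwise_lt :
    ∀ (l1 l2 : List Int), List.Pairwise (· < ·) l1 → List.Pairwise (· < ·) l2 →
      (∀ x, x ∈ l1 ↔ x ∈ l2) → l1 = l2 := by
  intro l1
  induction l1 with
  | nil =>
      intro l2 _ _ hmem
      cases l2 with
      | nil => rfl
      | cons b s => exact absurd ((hmem b).mpr (List.mem_cons_self ..)) (List.not_mem_nil)
  | cons a t ih =>
      intro l2 h1 h2 hmem
      cases l2 with
      | nil => exact absurd ((hmem a).mp (List.mem_cons_self ..)) (List.not_mem_nil)
      | cons b s =>
          rw [List.pairwise_cons] at h1 h2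
          have hab : a = b := by
            rcases List.mem_cons.mp ((hmem a).mp (List.mem_cons_self ..)) with h | h
            · exact h
            · rcases List.mem_cons.mp ((hmem b).mpr (List.mem_cons_self ..)) with h' | h'
              · omega
              · have := h2.1 a h
                have := h1.1 b h'
                omega
          subst hab
          have : t = s := by
            refine ih s h1.2 h2.2 (fun x => ?_)
            constructor
            · intro hx
              rcases List.mem_cons.mp ((hmem x).mp (List.mem_cons_of_mem _ hx)) with h | h
              · exact absurd h (by have := h1.1 x hx; omega)
              · exact h
            · intro hx
              rcases List.mem_cons.mp ((hmem x).mpr (List.mem_cons_of_mem _ hx)) with h | h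
              · exact absurd h (by have := h2.1 x hx; omega)
              · exact h
          rw [this]

lemma pv_clamp_ne (tp : Int) :
    ∀ (raw acc : List (Int × Int)), (∀ p ∈ acc, p.1 ≤ p.2) →
      ∀ p ∈ raw.foldl (pvClampStep tp) acc, p.1 ≤ p.2 := by
  intro raw
  induction raw with
  | nil => intro acc hacc; exact hacc
  | cons p r ih =>
      intro acc hacc
      rw [List.foldl_cons, pvClampStep_eq]
      split_ifs with h
      · refine ih _ (fun q hq => ?_)
        rcases List.mem_append.mp hq with h' | h'
        · exact hacc q h'
        · simp only [List.mem_singleton] at h'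
          subst h'
          exact h
      · exact ih _ hacc

lemma pv_clamp_mem (tp : Int) :
    ∀ (raw acc : List (Int × Int)) (x : Int),
      (∃ p ∈ raw.foldl (pvClampStep tp) acc, p.1 ≤ x ∧ x ≤ p.2)
        ↔ (∃ p ∈ acc, p.1 ≤ x ∧ x ≤ p.2) ∨
          (∃ p ∈ raw, max p.1 1 ≤ x ∧ x ≤ min p.2 tp) := by
  intro raw
  induction raw with
  | nil => intro acc x; simp
  | cons p r ih =>
      intro acc x
      rw [List.foldl_cons, pvClampStep_eq]
      split_ifs with h
      · rw [ih]
        simp only [List.mem_append, List.mem_cons, List.not_mem_nil, or_false]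
        constructor
        · rintro (⟨q, hq | rfl, hxq⟩ | ⟨q, hq, hxq⟩)
          · exact Or.inl ⟨q, hq, hxq⟩
          · exact Or.inr ⟨p, Or.inl rfl, by simpa using hxq⟩
          · exact Or.inr ⟨q, Or.inr hq, hxq⟩
        · rintro (⟨q, hq, hxq⟩ | ⟨q, rfl | hq, hxq⟩)
          · exact Or.inl ⟨q, Or.inl hq, hxq⟩
          · exact Or.inl ⟨(max q.1 1, min q.2 tp), Or.inr rfl, by simpa using hxq⟩
          · exact Or.inr ⟨q, hq, hxq⟩
      · rw [ih]
        simp only [List.mem_cons]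
        constructor
        · rintro (⟨q, hq, hxq⟩ | ⟨q, hq, hxq⟩)
          · exact Or.inl ⟨q, hq, hxq⟩
          · exact Or.inr ⟨q, Or.inr hq, hxq⟩
        · rintro (⟨q, hq, hxq⟩ | ⟨q, rfl | hq, hxq⟩)
          · exact Or.inl ⟨q, hq, hxq⟩
          · exact absurd hxq (by omega)
          · exact Or.inr ⟨q, hq, hxq⟩

-- ===== VERDICT (by name: the statement is the Claim_ definition above) =====
theorem get_pagination_list_spec : Claim_equal_get_pagination_list := by
  intro cp tp le re lc rc _
  show get_pagination_list cp tp le re lc rc = get_pagination_list_alt cp tp le re lc rc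
  have hA : get_pagination_list cp tp le re lc rc
      = pvRender 0 ((PySem.List.pyRange 1 (tp + 1) 1).filter fun n =>
          decide (n ≤ le ∨ tp - re < n ∨ (cp - lc ≤ n ∧ n ≤ cp + rc))) := by
    unfold get_pagination_list
    have := pv_foldA (fun num => num ≤ le ∨ tp - re < num ∨ (cp - lc ≤ num ∧ num ≤ cp + rc))
      (PySem.List.pyRange 1 (tp + 1) 1) [] 0
    simpa using this
  set raw : List (Int × Int) := [(1, le), (cp - lc, cp + rc), (tp - re + 1, tp)] with hraw
  set ivs : List (Int × Int) := raw.foldl (pvClampStep tp) [] with hivs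
  set sIvs : List (Int × Int) := PySem.List.sorted ivs (fun iv => iv.1) false with hsivs
  set merged : List (Int × Int) := sIvs.foldl pvMergeStep [] with hmerged
  have hB : get_pagination_list_alt cp tp le re lc rc = (merged.foldl pvEmitStep ([], 0)).1 := rfl
  have hivs_ne : ∀ p ∈ ivs, p.1 ≤ p.2 := pv_clamp_ne tp raw [] (by simp)
  have hs_ne : ∀ p ∈ sIvs, p.1 ≤ p.2 := fun p hp =>
    hivs_ne p ((PySem.List.mem_sorted ivs (fun iv => iv.1) false p).mp hp)
  have hs_pw : List.Pairwise (fun p q : Int × Int => p.1 ≤ q.1) sIvs :=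
    PySem.List.sorted_pairwise ivs (fun iv => iv.1)
  have hmf := pv_merge_fold sIvs [] hs_ne hs_pw ⟨List.isChain_nil, by simp⟩ (by simp)
  have hchain : pvChain merged := hmf.1
  have hun : ∀ x : Int, (∃ p ∈ merged, p.1 ≤ x ∧ x ≤ p.2) ↔ ∃ p ∈ sIvs, p.1 ≤ x ∧ x ≤ p.2 := by
    intro x
    have := hmf.2 x
    simpa using this
  have hBE : get_pagination_list_alt cp tp le re lc rc
      = pvRender 0 (merged.flatMap fun p => PySem.List.pyRange p.1 (p.2 + 1) 1) := by
    rw [hB, pv_foldB]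
    simpa using pv_emit_eq_render merged 0 hchain.2
  rw [hA, hBE]
  congr 1
  refine pv_eq_of_pairwise_lt _ _
    (List.Pairwise.sublist List.filter_sublist (PySem.List.pairwise_lt_pyRange_one 1 (tp + 1)))
    (pv_flat_sorted merged hchain).1 (fun x => ?_)
  rw [pv_mem_flat, hun x, hsivs]
  simp only [List.mem_filter, PySem.List.mem_pyRange_one, decide_eq_true_eq,
    PySem.List.mem_sorted]
  rw [hivs, show (∃ p ∈ List.foldl (pvClampStep tp) [] raw, p.1 ≤ x ∧ x ≤ p.2) ↔ _ from
    pv_clamp_mem tp raw [] x]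
  simp only [List.mem_cons, List.not_mem_nil, false_and, exists_false, false_or, hraw]
  constructor
  · rintro ⟨⟨h1, h2⟩, h3⟩
    rcases h3 with h3 | h3 | h3
    · exact ⟨(1, le), Or.inl rfl, by simp; omega⟩
    · exact ⟨(tp - re + 1, tp), Or.inr (Or.inr (Or.inl rfl)), by simp; omega⟩
    · exact ⟨(cp - lc, cp + rc), Or.inr (Or.inl rfl), by simp; omega⟩
  · rintro ⟨p, hp | hp | hp | hp, hxp⟩
    · subst hp; simp only [max_le_iff, le_min_iff] at hxp; exact ⟨by omega, by omega⟩
    · subst hp; simp only [max_le_iff, le_min_iff] at hxp; exact ⟨by omega, by omega⟩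
    · subst hp; simp only [max_le_iff, le_min_iff] at hxp; exact ⟨by omega, by omega⟩
    · exact hp.elim
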